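-- pv_equiv track=rewrite | github.com/meanregressive/personalized-limerick-generator | Final_Limerick.py | get_alternate_syllable
-- ===== SOURCE A (Python) =====
-- def get_alternate_syllable(to_rhyme):
--     """
--     params: str
--
--     In case no good matches found with the original syllable,
--     this function finds an alternate syllable that only returns the first vowel
--     from the reverse order and the letters following it, i.e. not the vowel
--     and the letter before it in the name.
--
--     returns: str
--     """
--
--     vow = ['a', 'e', 'i', 'o', 'u']
--     max = len(to_rhyme)
--     alt_syll = ''
--
--     for i in reversed(range(0, max)):
--         if to_rhyme[i] not in vow:
--             alt_syll += to_rhyme[i]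
--         else:
--             alt_syll += to_rhyme[i]
--             break
--     alt_syll_corrected = alt_syll[::-1]
--     alt_syll = alt_syll_corrected
--     return alt_syll
-- ===== SOURCE B (Python) =====
-- def get_alternate_syllable(to_rhyme):
--     """Forward scan: remember the index of the last lowercase vowel, then slice."""
--     idx = None
--     for i, ch in enumerate(to_rhyme):
--         if ch in 'aeiou':
--             idx = i
--     if idx is None:
--         return to_rhyme
--     return to_rhyme[idx:]
-- ===== Notes on version B (the rewrite author's own statement) =====
-- stated objective: simpler
-- what changed: Replaces the reverse-iterate-accumulate-then-reverse loop with a forward scan that records the last vowel index followed by a single slice.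
import Mathlib
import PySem

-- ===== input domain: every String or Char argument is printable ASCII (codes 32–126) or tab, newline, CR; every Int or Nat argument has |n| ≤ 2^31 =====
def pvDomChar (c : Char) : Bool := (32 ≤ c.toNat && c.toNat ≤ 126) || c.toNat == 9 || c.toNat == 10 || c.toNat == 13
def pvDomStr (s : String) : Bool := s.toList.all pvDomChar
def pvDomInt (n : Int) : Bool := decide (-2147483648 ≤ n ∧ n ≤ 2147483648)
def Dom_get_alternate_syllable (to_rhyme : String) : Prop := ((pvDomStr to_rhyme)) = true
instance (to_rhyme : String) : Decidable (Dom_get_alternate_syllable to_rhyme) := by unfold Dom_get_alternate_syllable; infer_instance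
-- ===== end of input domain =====

-- B replaces A's reverse-iterate-accumulate-then-reverse loop by a forward scan for the
-- last vowel index followed by one slice (objective: simpler); same return value everywhere.

-- ===== PORT A =====
-- vow = ['a', 'e', 'i', 'o', 'u']
def pvVowA : List Char := ['a', 'e', 'i', 'o', 'u']

-- the 'for i in reversed(range(0, max))' loop with the break: walks the reversed character
-- list, appending each char to the accumulator list, stopping after the first vowel
def pvALoop : List Char → List Char
  | [] => []
  | c :: rest => if c ∈ pvVowA then [c] else c :: pvALoop rest

-- A builds alt_syll by += over the reversed indices, then reverses it ([::-1])
def get_alternate_syllable (to_rhyme : String) : String :=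
  String.ofList ((pvALoop to_rhyme.toList.reverse).reverse)

-- ===== PORT B =====
-- loop body: 'if ch in 'aeiou': idx = i'  (accumulator = current last vowel index)
def pvBStep (acc : Option Int) (p : Int × Char) : Option Int :=
  if p.2 ∈ ['a', 'e', 'i', 'o', 'u'] then some p.1 else acc

-- 'for i, ch in enumerate(to_rhyme)': fold over the (index, char) pairs
def pvBIdx (cs : List Char) : Option Int := (PySem.List.enumerate cs).foldl pvBStep none

-- 'return to_rhyme if idx is None else to_rhyme[idx:]'; the slice to_rhyme[i:] with the
-- nonnegative enumerate index i is exactly List.drop i.toNat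
def get_alternate_syllable_alt (to_rhyme : String) : String :=
  match pvBIdx to_rhyme.toList with
  | none => to_rhyme
  | some i => String.ofList (to_rhyme.toList.drop i.toNat)

-- ===== PRECONDITION & SPEC =====
def Spec_get_alternate_syllable (to_rhyme : String) (out : String) : Prop := out = get_alternate_syllable_alt to_rhyme
instance (to_rhyme : String) (out : String) : Decidable (Spec_get_alternate_syllable to_rhyme out) := by unfold Spec_get_alternate_syllable; infer_instance

-- ===== CLAIM (what is proved, stated in full; the proofs are below) =====
def Claim_equal_get_alternate_syllable : Prop := ∀ (to_rhyme : String), Dom_get_alternate_syllable to_rhyme → Spec_get_alternate_syllable to_rhyme (get_alternate_syllable to_rhyme)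

-- ===== LEMMAS AND PROOFS =====

-- the crux: on any character list, A's reversed accumulator equals B's
-- last-vowel-index-then-drop result, and B's index is always in range
theorem pv_key (cs : List Char) :
    (pvALoop cs.reverse).reverse =
      (match pvBIdx cs with | none => cs | some i => cs.drop i.toNat) ∧
    (∀ i, pvBIdx cs = some i → 0 ≤ i ∧ i.toNat < cs.length) := by
  induction cs using List.reverseRecOn with
  | nil => simp [pvALoop, pvBIdx, PySem.List.enumerate]
  | append_singleton cs c ih =>
    obtain ⟨ih1, ih2⟩ := ih
    have hfold : pvBIdx (cs ++ [c]) =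
        if c ∈ ['a', 'e', 'i', 'o', 'u'] then some (cs.length : Int) else pvBIdx cs := by
      simp [pvBIdx, PySem.List.enumerate_append, List.foldl_append, pvBStep,
        PySem.List.enumerate_cons, PySem.List.enumerate_nil]
    rw [List.reverse_concat]
    by_cases hc : c ∈ ['a', 'e', 'i', 'o', 'u']
    · constructor
      · simp [pvALoop, hfold, hc, pvVowA]
      · intro i hi
        rw [hfold, if_pos hc] at hi
        simp at hi
        simp [← hi]
    · have hA : pvALoop (c :: cs.reverse) = c :: pvALoop cs.reverse := by
        simp [pvALoop, pvVowA]
        intro h; exact absurd (by simpa using h) hc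
      constructor
      · rw [hA]
        simp only [List.reverse_cons]
        rw [hfold, if_neg hc]
        cases hb : pvBIdx cs with
        | none => rw [hb] at ih1; simp [ih1]
        | some i =>
          rw [hb] at ih1
          have hlt : i.toNat ≤ cs.length := le_of_lt (ih2 i hb).2
          simp only [ih1]
          rw [List.drop_append_of_le_length hlt]
      · intro i hi
        rw [hfold, if_neg hc] at hi
        have := ih2 i hi
        simp; omega

-- ===== VERDICT (by name: the statement is the Claim_ definition above) =====
theorem get_alternate_syllable_spec : Claim_equal_get_alternate_syllable := by
  intro s _
  unfold Spec_get_alternate_syllable get_alternate_syllable get_alternate_syllable_alt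
  rw [(pv_key s.toList).1]
  cases h : pvBIdx s.toList with
  | none => simp [String.ofList_toList]
  | some i => simp
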